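-- pv_equiv track=rewrite | github.com/jJayyyyyyy/OJ | PAT/basic_level/1003_我要通过/pass_pat.py | correct_cnt
-- ===== SOURCE A (Python) =====
-- def correct_cnt(us_str):
-- 	cnt_p, cnt_a, cnt_t = 0, 0, 0
--
-- 	for i in range( len(us_str) ):
-- 		if us_str[i]=='P':
-- 			cnt_p += 1
-- 			posi_p = i
-- 		elif us_str[i]=='A':
-- 			cnt_a += 1
-- 		elif us_str[i]=='T':
-- 			cnt_t += 1
-- 			posi_t = i
-- 		else:
-- 			return False
--
-- 	if 1!=cnt_p:
-- 		return False
-- 	elif 0==cnt_a: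
-- 		return False
-- 	elif 1!=cnt_t:
-- 		return False
-- 	else:
-- 		return True
-- ===== SOURCE B (Python) =====
-- def correct_cnt(us_str):
--     # Sort-then-pattern-match: the string is valid iff its sorted form is
--     # 'A' * k + 'PT' with k >= 1 (i.e. at least one A, exactly one P and one T,
--     # nothing else), since sorting groups equal characters and 'A' < 'P' < 'T'.
--     t = sorted(us_str)
--     return len(t) >= 3 and t[-2:] == ['P', 'T'] and all(c == 'A' for c in t[:-2])
-- ===== Notes on version B (the rewrite author's own statement) =====
-- stated objective: alternative
-- what changed: Replaced the single counting pass with sort-then-pattern-match: sort the characters and accept iff the sorted list is 'A'*k + ['P','T'] with k>=1 (last two chars are exactly ['P','T'] and everything before them is 'A'), which is equivalent because sorting groups equal characters and 'A' < 'P' < 'T'.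
import Mathlib
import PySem

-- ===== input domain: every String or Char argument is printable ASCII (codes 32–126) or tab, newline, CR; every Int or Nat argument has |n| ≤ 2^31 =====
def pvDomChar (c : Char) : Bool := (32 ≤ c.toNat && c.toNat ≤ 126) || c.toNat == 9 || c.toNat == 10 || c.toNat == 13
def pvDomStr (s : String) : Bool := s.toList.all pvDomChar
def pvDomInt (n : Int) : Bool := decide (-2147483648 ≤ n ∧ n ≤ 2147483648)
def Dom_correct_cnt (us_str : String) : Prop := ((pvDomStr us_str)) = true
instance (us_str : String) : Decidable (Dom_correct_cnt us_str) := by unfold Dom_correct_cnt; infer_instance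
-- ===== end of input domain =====

-- B replaces A's counting pass by sort-then-pattern-match: sorted(us_str) must be 'A'*k ++ ['P','T'], k ≥ 1 (alternative algorithm, same result).

-- ===== PORT A =====
-- A's final if/elif chain on the three counters (the code after the loop).
def correct_cnt_final (cnt_p cnt_a cnt_t : Nat) : Bool :=
  if 1 ≠ cnt_p then false
  else if 0 = cnt_a then false
  else if 1 ≠ cnt_t then false
  else true

-- A's index loop over us_str (structural recursion over the characters, same counter state;
-- posi_p/posi_t are assigned in A but never used in the result, so they carry no state here).
def correct_cnt_go : List Char → Nat → Nat → Nat → Bool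
  | [], cnt_p, cnt_a, cnt_t => correct_cnt_final cnt_p cnt_a cnt_t
  | c :: rest, cnt_p, cnt_a, cnt_t =>
    if c = 'P' then correct_cnt_go rest (cnt_p + 1) cnt_a cnt_t
    else if c = 'A' then correct_cnt_go rest cnt_p (cnt_a + 1) cnt_t
    else if c = 'T' then correct_cnt_go rest cnt_p cnt_a (cnt_t + 1)
    else false

def correct_cnt (us_str : String) : Bool := correct_cnt_go us_str.toList 0 0 0

-- ===== PORT B =====
-- t = sorted(us_str); len(t) >= 3 and t[-2:] == ['P','T'] and all(c == 'A' for c in t[:-2])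
def correct_cnt_alt (us_str : String) : Bool :=
  let t := PySem.List.sorted us_str.toList (fun c => c) false
  decide (3 ≤ t.length)
  && (PySem.List.slice t (some (-2)) none == ['P', 'T'])
  && (PySem.List.slice t none (some (-2))).all (fun c => c == 'A')

-- ===== PRECONDITION & SPEC =====
def Spec_correct_cnt (us_str : String) (out : Bool) : Prop := out = correct_cnt_alt us_str
instance (us_str : String) (out : Bool) : Decidable (Spec_correct_cnt us_str out) := by unfold Spec_correct_cnt; infer_instance

-- ===== CLAIM (what is proved, stated in full; the proofs are below) =====
def Claim_equal_correct_cnt : Prop := ∀ (us_str : String), Dom_correct_cnt us_str → Spec_correct_cnt us_str (correct_cnt us_str)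

-- ===== LEMMAS AND PROOFS =====

-- Loop invariant: A's loop equals "all chars allowed" && final check on accumulated counts.
theorem go_eq (cs : List Char) : ∀ (p a t : Nat),
    correct_cnt_go cs p a t
      = ((cs.all fun c => c == 'P' || c == 'A' || c == 'T')
          && correct_cnt_final (p + cs.count 'P') (a + cs.count 'A') (t + cs.count 'T')) := by
  induction cs with
  | nil => intro p a t; simp [correct_cnt_go]
  | cons c rest ih =>
    intro p a t
    by_cases hP : c = 'P'
    · subst hP
      simp [correct_cnt_go, ih, Nat.add_assoc, Nat.add_comm 1]
    · by_cases hA : c = 'A'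
      · subst hA
        simp [correct_cnt_go, hP, ih, Nat.add_assoc, Nat.add_comm 1]
      · by_cases hT : c = 'T'
        · subst hT
          simp [correct_cnt_go, hP, hA, ih, Nat.add_assoc, Nat.add_comm 1]
        · simp [correct_cnt_go, hP, hA, hT]

-- A in prop form: every char allowed, exactly one P, exactly one T, at least one A.
theorem A_iff (cs : List Char) :
    correct_cnt_go cs 0 0 0 = true ↔
      ((∀ c ∈ cs, c = 'P' ∨ c = 'A' ∨ c = 'T') ∧
        cs.count 'P' = 1 ∧ cs.count 'T' = 1 ∧ 1 ≤ cs.count 'A') := by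
  rw [go_eq]
  simp only [correct_cnt_final, Nat.zero_add]
  constructor
  · intro h
    simp only [Bool.and_eq_true, List.all_eq_true] at h
    obtain ⟨hall, hfin⟩ := h
    split_ifs at hfin with h1 h2 h3
    refine ⟨fun c hc => ?_, by omega, by omega, by omega⟩
    have := hall c hc
    simp only [Bool.or_eq_true, beq_iff_eq] at this; tauto

  · rintro ⟨hall, hp, ht, ha⟩
    simp only [Bool.and_eq_true, List.all_eq_true]
    refine ⟨fun c hc => ?_, ?_⟩
    · have := hall c hc
      simp only [Bool.or_eq_true, beq_iff_eq]; tauto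
    · split_ifs with h1 h2 h3
      · exact absurd hp.symm h1
      · exact absurd h2 (by omega)
      · exact absurd ht.symm h3
      · rfl

-- If the counts are right, the sorted list is literally 'A'*k ++ ['P','T'].
theorem sorted_shape (cs : List Char)
    (hall : ∀ c ∈ cs, c = 'P' ∨ c = 'A' ∨ c = 'T')
    (hp : cs.count 'P' = 1) (ht : cs.count 'T' = 1) :
    PySem.List.sorted cs (fun c => c) false
      = List.replicate (cs.count 'A') 'A' ++ ['P', 'T'] := by
  apply PySem.List.sorted_id_eq_of_perm_of_pairwise
  · apply List.perm_iff_count.mpr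
    intro a
    by_cases hA : a = 'A'
    · subst hA; simp [List.count_append]
    · by_cases hP : a = 'P'
      · subst hP; simp [List.count_append, List.count_replicate, hp]
      · by_cases hT : a = 'T'
        · subst hT; simp [List.count_append, List.count_replicate, ht]
        · have hmem : a ∉ cs := fun hmem => by rcases hall a hmem with h | h | h <;> simp_all
          have hA' : ¬('A' = a) := fun h => hA h.symm
          have hP' : ¬('P' = a) := fun h => hP h.symm
          have hT' : ¬('T' = a) := fun h => hT h.symm
          simp [List.count_append, List.count_replicate, List.count_eq_zero.mpr hmem,
            hA', hP', hT']
  · simp only [List.pairwise_append, List.mem_replicate]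
    refine ⟨?_, ?_, ?_⟩
    · exact List.pairwise_replicate.mpr (Or.inr le_rfl)
    · decide
    · rintro a ⟨-, rfl⟩ b hb
      simp only [List.mem_cons] at hb
      rcases hb with rfl | rfl | h <;> first | decide | simp_all

-- ===== VERDICT (by name: the statement is the Claim_ definition above) =====
theorem correct_cnt_spec : Claim_equal_correct_cnt := by
  intro s _
  unfold Spec_correct_cnt correct_cnt correct_cnt_alt
  have hslice1 := PySem.List.slice_from_neg_ofNat (PySem.List.sorted s.toList (fun c => c) false) 2 (by omega)
  have hslice2 := PySem.List.slice_to_neg_ofNat (PySem.List.sorted s.toList (fun c => c) false) 2 (by omega)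
  rw [show (let t := PySem.List.sorted s.toList (fun c => c) false
        decide (3 ≤ t.length)
        && (PySem.List.slice t (some (-2)) none == ['P', 'T'])
        && (PySem.List.slice t none (some (-2))).all (fun c => c == 'A'))
      = (decide (3 ≤ (PySem.List.sorted s.toList (fun c => c) false).length)
        && (((PySem.List.sorted s.toList (fun c => c) false).drop
              ((PySem.List.sorted s.toList (fun c => c) false).length - 2)) == ['P', 'T'])
        && (((PySem.List.sorted s.toList (fun c => c) false).take
              ((PySem.List.sorted s.toList (fun c => c) false).length - 2)).all (fun c => c == 'A')))
      from by rw [← hslice1, ← hslice2]]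
  rw [Bool.eq_iff_iff, A_iff]
  generalize hcs : s.toList = cs
  set t := PySem.List.sorted cs (fun c => c) false with htdef
  simp only [Bool.and_eq_true, decide_eq_true_eq, beq_iff_eq, List.all_eq_true, beq_iff_eq]
  constructor
  · rintro ⟨hall, hp, ht, ha⟩
    have hshape := sorted_shape cs hall hp ht
    rw [htdef, hshape]
    set k := cs.count 'A' with hk
    have hlen : (List.replicate k 'A' ++ ['P', 'T']).length = k + 2 := by simp
    refine ⟨⟨by rw [hlen]; omega, ?_⟩, ?_⟩
    · rw [hlen]
      have : k + 2 - 2 = (List.replicate k 'A').length := by simp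
      rw [this, List.drop_left]
    · intro c hc
      rw [hlen] at hc
      have : k + 2 - 2 = (List.replicate k 'A').length := by simp
      rw [this, List.take_left] at hc
      exact (List.eq_of_mem_replicate hc)
  · rintro ⟨⟨h3, hdrop⟩, htake⟩
    have hperm : t.Perm cs := PySem.List.sorted_perm cs (fun c => c) false
    have hsplit : t.take (t.length - 2) ++ t.drop (t.length - 2) = t :=
      List.take_append_drop _ t
    have hlentake : (t.take (t.length - 2)).length = t.length - 2 := by
      rw [List.length_take]; omega
    have hcount : ∀ a : Char, cs.count a = (t.take (t.length - 2)).count a + (['P', 'T'] : List Char).count a := by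
      intro a
      conv_lhs => rw [← hperm.count_eq a, ← hsplit]
      rw [List.count_append, hdrop]
    have hPnot : 'P' ∉ t.take (t.length - 2) := fun h => by
      have := htake _ h; simp_all
    have hTnot : 'T' ∉ t.take (t.length - 2) := fun h => by
      have := htake _ h; simp_all
    refine ⟨?_, ?_, ?_, ?_⟩
    · intro c hc
      have hct : c ∈ t := (hperm.mem_iff).mpr hc
      rw [← hsplit] at hct
      rcases List.mem_append.mp hct with h | h
      · exact Or.inr (Or.inl (htake _ h))
      · rw [hdrop] at h; simp only [List.mem_cons] at h
        simp only [List.not_mem_nil, or_false] at h; tauto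
    · rw [hcount 'P', List.count_eq_zero.mpr hPnot]; decide
    · rw [hcount 'T', List.count_eq_zero.mpr hTnot]; decide
    · rw [hcount 'A']
      have : (t.take (t.length - 2)).count 'A' = (t.take (t.length - 2)).length :=
        List.count_eq_length.mpr (fun c hc => ((htake c hc) ▸ rfl))
      rw [this, hlentake]; omega
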